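-- pv_equiv track=rewrite | github.com/selfreferencing/erdos-86-lean | analyze_resistant.py | get_primes_in_class
-- ===== SOURCE A (Python) =====
-- def is_prime(n):
--     if n < 2:
--         return False
--     if n == 2:
--         return True
--     if n % 2 == 0:
--         return False
--     if n < 9:
--         return True
--     if n % 3 == 0:
--         return False
--     r, d = 0, n - 1
--     while d % 2 == 0:
--         r += 1
--         d //= 2
--     witnesses = [2, 3, 5, 7, 11, 13, 17, 19, 23, 29, 31, 37]
--     for a in witnesses:
--         if a >= n:
--             continue
--         x = pow(a, d, n)
--         if x == 1 or x == n - 1: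
--             continue
--         for _ in range(r - 1):
--             x = pow(x, 2, n)
--             if x == n - 1:
--                 break
--         else:
--             return False
--     return True
--
-- def get_primes_in_class(r, M=840, count=20, limit=10**8):
--     """Get primes in residue class r mod M."""
--     primes = []
--     p = r
--     while len(primes) < count and p < limit:
--         if p > 1 and is_prime(p):
--             primes.append(p)
--         p += M
--     return primes
-- ===== SOURCE B (Python) =====
-- _BASES = (2, 3, 5, 7, 11, 13, 17, 19, 23, 29, 31, 37)
--
-- def _strong(n, a):
--     """Strong-probable-prime check of n to base a, scanning the halved Fermat
--     exponents (n-1)/2, (n-1)/4, ... top-down with independent modular powers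
--     (no d*2^s decomposition, no shared squaring chain)."""
--     e = n - 1
--     while e % 2 == 0:
--         e //= 2
--         if pow(a, e, n) == n - 1:
--             return True
--     return pow(a, e, n) == 1
--
-- def _is_prime(n):
--     if n < 9:
--         return n in (2, 3, 5, 7)
--     if n % 2 == 0 or n % 3 == 0:
--         return False
--     return all(_strong(n, a) for a in _BASES if a < n)
--
-- def _next_prime(p, M, limit):
--     """First q in p, p+M, p+2M, ... with q < limit on the way, q > 1 and prime; None if the scan leaves [*, limit)."""
--     while p < limit:
--         if p > 1 and _is_prime(p):
--             return p
--         p += M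
--     return None
--
-- def get_primes_in_class(r, M=840, count=20, limit=10**8):
--     """Get primes in residue class r mod M."""
--     primes = []
--     p = r
--     for _ in range(count):
--         q = _next_prime(p, M, limit)
--         if q is None:
--             break
--         primes.append(q)
--         p = q + M
--     return primes
-- ===== Notes on version B (the rewrite author's own statement) =====
-- stated objective: alternative
-- what changed: The primality test no longer factors n-1 into d*2^r and walks a shared squaring chain bottom-up with a for-else: B scans the halved Fermat exponents (n-1)/2, (n-1)/4, ... top-down, computing an independent pow(a, e, n) at each step, handles n < 9 by a membership table, and combines bases with all(); the driver is decomposed into a _next_prime helper called count times instead of A's fused while-loop.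
-- outside the precondition, e.g. on get_primes_in_class(3, 0, 2, 10): A returns [3, 3], B returns [3, 3]; on get_primes_in_class(5, -1, 1, 10): A returns [5], B returns [5]
import Mathlib
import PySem

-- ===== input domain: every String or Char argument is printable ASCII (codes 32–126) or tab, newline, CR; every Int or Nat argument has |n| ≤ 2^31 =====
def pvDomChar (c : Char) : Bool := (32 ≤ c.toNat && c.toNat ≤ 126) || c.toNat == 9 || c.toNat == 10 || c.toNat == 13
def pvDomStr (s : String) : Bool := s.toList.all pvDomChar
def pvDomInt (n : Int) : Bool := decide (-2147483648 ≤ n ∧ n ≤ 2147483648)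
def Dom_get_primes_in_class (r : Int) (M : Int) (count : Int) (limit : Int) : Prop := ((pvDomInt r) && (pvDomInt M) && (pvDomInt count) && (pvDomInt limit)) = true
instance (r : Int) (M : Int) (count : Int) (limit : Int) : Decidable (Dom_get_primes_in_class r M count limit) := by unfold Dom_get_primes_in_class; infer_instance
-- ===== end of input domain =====

-- B replaces A's decompose-then-square Miller-Rabin body by a top-down scan of the halved Fermat
-- exponents (n-1)/2, (n-1)/4, ... with an independent modular power per step, and drives the
-- progression by a next-prime helper called count times; objective: alternative (same cost class).

-- ===== PORT A =====
-- Python's three-argument pow(a, e, n): exact binary modular exponentiation for n > 0 (each step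
-- reduces with Python's mod). PySem.Int.powMod computes a^e in full first and cannot be evaluated
-- at the exponent sizes this program reaches, so the built-in is ported by hand here (used by both ports).
def pvPowMod (a n : Int) (e : Nat) : Int :=
  if he : e = 0 then PySem.Int.mod 1 n
  else
    let h := pvPowMod a n (e / 2)
    let h2 := PySem.Int.mod (h * h) n
    if e % 2 = 1 then PySem.Int.mod (h2 * a) n else h2
termination_by e
decreasing_by exact Nat.div_lt_self (Nat.pos_of_ne_zero he) (by norm_num)

-- A's `while d % 2 == 0` loop; fuel: d halves while positive, so (n-1).toNat steps always suffice
-- at the call site (d starts at n - 1 with n ≥ 11 there).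
def pvMRDecomp (fuel : Nat) (racc : Int) (d : Int) : Int × Int :=
  match fuel with
  | 0 => (racc, d)
  | fuel + 1 =>
    if PySem.Int.mod d 2 = 0 then pvMRDecomp fuel (racc + 1) (PySem.Int.floordiv d 2)
    else (racc, d)

-- A's inner `for _ in range(r - 1)` with break / for-else; returns true iff the break fired.
def pvAInner (n : Int) (x : Int) : Nat → Bool
  | 0 => false
  | k + 1 =>
    let x' := pvPowMod x n 2
    if x' = n - 1 then true else pvAInner n x' k

def pvWitnessesA : List Int := [2, 3, 5, 7, 11, 13, 17, 19, 23, 29, 31, 37]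

-- A's `for a in witnesses` loop with the early `return False`.
def pvAWitnessLoop (n : Int) (d : Int) (rr : Int) : List Int → Bool
  | [] => true
  | a :: rest =>
    if n ≤ a then pvAWitnessLoop n d rr rest
    else
      let x := pvPowMod a n d.toNat
      if x = 1 ∨ x = n - 1 then pvAWitnessLoop n d rr rest
      else if pvAInner n x (rr - 1).toNat then pvAWitnessLoop n d rr rest
      else false

-- the Miller-Rabin tail of A's is_prime (reached only for odd n ≥ 11 with 3 ∤ n)
def pvMRA (n : Int) : Bool :=
  let rd := pvMRDecomp (n - 1).toNat 0 (n - 1)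
  pvAWitnessLoop n rd.2 rd.1 pvWitnessesA

def pvIsPrimeA (n : Int) : Bool :=
  if n < 2 then false
  else if n = 2 then true
  else if PySem.Int.mod n 2 = 0 then false
  else if n < 9 then true
  else if PySem.Int.mod n 3 = 0 then false
  else pvMRA n

-- A's `while len(primes) < count and p < limit` loop; fuel: inside Pre_ either the loop exits at
-- once or p grows by M ≥ 1 per step, so (limit - r).toNat + 1 steps always suffice there.
def pvALoop (M count limit : Int) : Nat → Int → List Int → List Int
  | 0, _, primes => primes
  | fuel + 1, p, primes =>
    if (primes.length : Int) < count ∧ p < limit then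
      if 1 < p ∧ pvIsPrimeA p = true then pvALoop M count limit fuel (p + M) (primes ++ [p])
      else pvALoop M count limit fuel (p + M) primes
    else primes

def get_primes_in_class (r : Int) (M : Int) (count : Int) (limit : Int) : List Int :=
  pvALoop M count limit ((limit - r).toNat + 1) r []

-- ===== PORT B =====
def pvBasesB : List Int := [2, 3, 5, 7, 11, 13, 17, 19, 23, 29, 31, 37]

-- B's _strong: `while e % 2 == 0: e //= 2; if pow(a, e, n) == n - 1: return True` then the final
-- `pow(a, e, n) == 1`; fuel: e halves while even and positive, so (n-1).toNat suffices at the call site.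
def pvStrong (n a : Int) : Nat → Int → Bool
  | 0, e => decide (pvPowMod a n e.toNat = 1)
  | f + 1, e =>
    if PySem.Int.mod e 2 = 0 then
      if pvPowMod a n (PySem.Int.floordiv e 2).toNat = n - 1 then true
      else pvStrong n a f (PySem.Int.floordiv e 2)
    else decide (pvPowMod a n e.toNat = 1)

def pvIsPrimeB (n : Int) : Bool :=
  if n < 9 then decide (n = 2 ∨ n = 3 ∨ n = 5 ∨ n = 7)
  else if PySem.Int.mod n 2 = 0 ∨ PySem.Int.mod n 3 = 0 then false
  else (pvBasesB.filter (fun a => decide (a < n))).all (fun a => pvStrong n a (n - 1).toNat (n - 1))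

-- B's _next_prime: `while p < limit` scan; fuel: inside Pre_ (M ≥ 1) it moves by M per step,
-- so (limit - p).toNat + 1 steps always suffice.
def pvNextPrime (M limit : Int) : Nat → Int → Option Int
  | 0, _ => none
  | f + 1, p =>
    if p < limit then
      if 1 < p ∧ pvIsPrimeB p = true then some p else pvNextPrime M limit f (p + M)
    else none

-- B's `for _ in range(count)` over _next_prime, with the break on None.
def pvBOuter (M limit : Int) : Nat → Int → List Int → List Int
  | 0, _, acc => acc
  | k + 1, p, acc =>
    match pvNextPrime M limit ((limit - p).toNat + 1) p with
    | none => acc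
    | some q => pvBOuter M limit k (q + M) (acc ++ [q])

def get_primes_in_class_alt (r : Int) (M : Int) (count : Int) (limit : Int) : List Int :=
  pvBOuter M limit count.toNat r []

-- ===== PRECONDITION & SPEC =====
-- Pre_ excludes M ≤ 0 with count > 0 and r < limit: there A's while-loop diverges except on thin
-- sets (M = 0 terminates only when r itself is a prime > 1, M < 0 only when count primes appear
-- before the descending progression drops below 2); B's Python mirrors A wherever A returns, but
-- the fueled Lean ports cannot follow those unbounded scans.
def Pre_get_primes_in_class (r : Int) (M : Int) (count : Int) (limit : Int) : Prop :=
  0 < M ∨ count ≤ 0 ∨ limit ≤ r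
instance (r : Int) (M : Int) (count : Int) (limit : Int) : Decidable (Pre_get_primes_in_class r M count limit) := by unfold Pre_get_primes_in_class; infer_instance

def pvWitness_get_primes_in_class : Int × Int × Int × Int := (3, 4, 2, 30)

def Spec_get_primes_in_class (r : Int) (M : Int) (count : Int) (limit : Int) (out : List Int) : Prop := out = get_primes_in_class_alt r M count limit
instance (r : Int) (M : Int) (count : Int) (limit : Int) (out : List Int) : Decidable (Spec_get_primes_in_class r M count limit out) := by unfold Spec_get_primes_in_class; infer_instance

-- ===== CLAIM (what is proved, stated in full; the proofs are below) =====
def Claim_equal_get_primes_in_class : Prop := ∀ (r : Int) (M : Int) (count : Int) (limit : Int), Dom_get_primes_in_class r M count limit → Pre_get_primes_in_class r M count limit → Spec_get_primes_in_class r M count limit (get_primes_in_class r M count limit)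

-- ===== LEMMAS AND PROOFS =====

-- (x % n * y) % n = (x * y) % n
theorem pvMulMod (x y n : Int) : x % n * y % n = x * y % n := by
  conv_rhs => rw [Int.mul_emod]
  rw [Int.mul_emod (x % n) y, Int.emod_emod_of_dvd x dvd_rfl]

-- squaring commutes with a prior reduction mod n
theorem pvSqMod (c n : Int) : (c % n) ^ 2 % n = c ^ 2 % n := by
  rw [pow_two, pvMulMod, mul_comm c (c % n), pvMulMod, ← pow_two]

-- the hand-ported pow(a, e, n) is a^e mod n (Python mod = emod for n > 0)
theorem pvPowMod_correct (a n : Int) (hn : 0 < n) : ∀ e : Nat, pvPowMod a n e = a ^ e % n := by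
  intro e
  induction e using Nat.strong_induction_on with
  | _ e ih =>
    by_cases he : e = 0
    · subst he
      rw [pvPowMod]
      simp [PySem.Int.mod_eq_emod_of_pos hn]
    · rw [pvPowMod]
      rw [dif_neg he]
      have ih2 := ih (e / 2) (Nat.div_lt_self (Nat.pos_of_ne_zero he) one_lt_two)
      simp only [PySem.Int.mod_eq_emod_of_pos hn, ih2]
      have hsq : a ^ (e / 2) % n * (a ^ (e / 2) % n) % n = a ^ (e / 2 + e / 2) % n := by
        rw [pvMulMod, mul_comm, pvMulMod, pow_add]
      by_cases hp : e % 2 = 1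
      · rw [if_pos hp, hsq, pvMulMod]
        have : a ^ (e / 2 + e / 2) * a = a ^ e := by
          rw [← pow_succ]
          congr 1
          omega
        rw [this]
      · rw [if_neg hp, hsq]
        congr 2
        omega

-- A's decomposition loop: for 0 < d ≤ fuel it returns (racc + s, m) with d = m * 2^s, m odd
theorem pvMRDecomp_spec : ∀ (fuel : Nat) (racc d : Int), 0 < d → d ≤ (fuel : Int) →
    ∃ (s : Nat) (m : Int), pvMRDecomp fuel racc d = (racc + (s : Int), m) ∧
      PySem.Int.mod m 2 = 1 ∧ 0 < m ∧ d = m * 2 ^ s := by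
  intro fuel
  induction fuel with
  | zero => intro racc d hd hle; exfalso; omega
  | succ f ih =>
    intro racc d hd hle
    have hm2 : PySem.Int.mod d 2 = d % 2 := PySem.Int.mod_eq_emod_of_pos (by norm_num)
    by_cases hev : PySem.Int.mod d 2 = 0
    · have hdev : d % 2 = 0 := by rw [← hm2]; exact hev
      have hfd : PySem.Int.floordiv d 2 = d / 2 := PySem.Int.floordiv_eq_ediv_of_pos (by norm_num)
      have h2 : 0 < d / 2 := by omega
      have h3 : d / 2 ≤ (f : Int) := by omega
      obtain ⟨s, m, heq, hodd, hmpos, hfac⟩ := ih (racc + 1) (d / 2) h2 h3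
      refine ⟨s + 1, m, ?_, hodd, hmpos, ?_⟩
      · rw [pvMRDecomp, if_pos hev, hfd, heq]
        simp only [Prod.mk.injEq]
        exact ⟨by push_cast; ring, trivial⟩
      · have : d = 2 * (d / 2) := by omega
        rw [this, hfac]; ring
    · refine ⟨0, d, ?_, ?_, hd, by ring⟩
      · rw [pvMRDecomp, if_neg hev]; simp
      · rw [hm2]; rw [hm2] at hev; omega

-- A's inner squaring loop, characterized on the residue chain of c
theorem pvAInner_spec (n : Int) (hn : 0 < n) : ∀ (k : Nat) (c : Int),
    pvAInner n (c % n) k = true ↔ ∃ i : Nat, 1 ≤ i ∧ i ≤ k ∧ c ^ (2 ^ i) % n = n - 1 := by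
  intro k
  induction k with
  | zero =>
    intro c
    simp only [pvAInner]
    constructor
    · intro h; exact absurd h (by simp)
    · rintro ⟨i, h1, h2, -⟩; omega
  | succ k ih =>
    intro c
    have hx' : pvPowMod (c % n) n 2 = c ^ 2 % n := by
      rw [pvPowMod_correct _ _ hn, pvSqMod]
    have hstep : pvAInner n (c % n) (k + 1)
        = if c ^ 2 % n = n - 1 then true else pvAInner n (c ^ 2 % n) k := by
      simp only [pvAInner, hx']
    rw [hstep]
    by_cases hc : c ^ 2 % n = n - 1
    · rw [if_pos hc]
      constructor
      · intro _
        exact ⟨1, le_refl 1, by omega, by rw [pow_one]; exact hc⟩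
      · intro _; rfl
    · rw [if_neg hc]
      rw [ih (c ^ 2)]
      constructor
      · rintro ⟨i, h1, h2, h3⟩
        refine ⟨i + 1, by omega, by omega, ?_⟩
        rw [← h3, ← pow_mul]
        congr 1
        rw [pow_succ]
        ring
      · rintro ⟨i, h1, h2, h3⟩
        have hi1 : i ≠ 1 := by
          intro h; subst h
          rw [pow_one] at h3; exact hc h3
        refine ⟨i - 1, by omega, by omega, ?_⟩
        rw [← pow_mul]
        have : 2 * 2 ^ (i - 1) = 2 ^ i := by
          rw [← pow_succ']
          congr 1
          omega
        rw [this]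
        exact h3

-- _strong returns the final check as soon as e is odd (or the fuel is exhausted)
theorem pvStrong_odd (n a : Int) (fuel : Nat) (e : Int) (h : ¬ PySem.Int.mod e 2 = 0) :
    pvStrong n a fuel e = decide (pvPowMod a n e.toNat = 1) := by
  cases fuel with
  | zero => rfl
  | succ f => simp only [pvStrong, if_neg h]

-- B's _strong on e = m * 2^s (m odd, s ≤ fuel): true iff some halved exponent hits n-1 or a^m hits 1
theorem pvStrong_spec (n a : Int) (hn : 0 < n) : ∀ (s fuel : Nat) (m : Int),
    0 < m → PySem.Int.mod m 2 = 1 → s ≤ fuel →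
    (pvStrong n a fuel (m * 2 ^ s) = true ↔
      ((∃ i : Nat, i < s ∧ a ^ (m.toNat * 2 ^ i) % n = n - 1) ∨ a ^ m.toNat % n = 1)) := by
  intro s
  induction s with
  | zero =>
    intro fuel m hm hodd _
    rw [pow_zero, mul_one, pvStrong_odd n a fuel m (by omega)]
    simp only [decide_eq_true_eq, pvPowMod_correct a n hn]
    constructor
    · intro h; exact Or.inr h
    · rintro (⟨i, hi, -⟩ | h)
      · omega
      · exact h
  | succ s' ih =>
    intro fuel m hm hodd hs
    obtain ⟨f, rfl⟩ : ∃ f, fuel = f + 1 := ⟨fuel - 1, by omega⟩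
    have he : m * 2 ^ (s' + 1) = (m * 2 ^ s') * 2 := by ring
    have hev : PySem.Int.mod (m * 2 ^ (s' + 1)) 2 = 0 := by
      rw [PySem.Int.mod_eq_emod_of_pos (by norm_num : (0:Int) < 2), he]
      exact Int.mul_emod_left _ _
    have hfd : PySem.Int.floordiv (m * 2 ^ (s' + 1)) 2 = m * 2 ^ s' := by
      rw [PySem.Int.floordiv_eq_ediv_of_pos (by norm_num : (0:Int) < 2), he]
      exact Int.mul_ediv_cancel _ (by norm_num)
    have htn : (m * 2 ^ s').toNat = m.toNat * 2 ^ s' := by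
      have h1 : ((m.toNat * 2 ^ s' : Nat) : Int) = m * 2 ^ s' := by
        push_cast [Int.toNat_of_nonneg (le_of_lt hm)]
        ring
      rw [← h1, Int.toNat_natCast]
    have hpow : pvPowMod a n (m * 2 ^ s').toNat = a ^ (m.toNat * 2 ^ s') % n := by
      rw [pvPowMod_correct a n hn, htn]
    simp only [pvStrong, if_pos hev, hfd, hpow]
    by_cases hhit : a ^ (m.toNat * 2 ^ s') % n = n - 1
    · rw [if_pos hhit]
      simp only [true_iff]
      exact Or.inl ⟨s', by omega, hhit⟩
    · rw [if_neg hhit, ih f m hm hodd (by omega)]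
      constructor
      · rintro (⟨i, hi, h⟩ | h)
        · exact Or.inl ⟨i, by omega, h⟩
        · exact Or.inr h
      · rintro (⟨i, hi, h⟩ | h)
        · have : i ≠ s' := by
            intro hh; subst hh; exact hhit h
          exact Or.inl ⟨i, by omega, h⟩
        · exact Or.inr h

-- A's witness loop equals all() with the a < n guard folded into each term
theorem pvAWitnessLoop_eq_all (n d rr : Int) : ∀ ws : List Int,
    pvAWitnessLoop n d rr ws = ws.all (fun a => !(decide (a < n)) ||
      (decide (pvPowMod a n d.toNat = 1 ∨ pvPowMod a n d.toNat = n - 1)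
        || pvAInner n (pvPowMod a n d.toNat) (rr - 1).toNat)) := by
  intro ws
  induction ws with
  | nil => simp [pvAWitnessLoop]
  | cons a rest ih =>
    by_cases hcmp : n ≤ a
    · simp [pvAWitnessLoop, hcmp, not_lt.mpr hcmp, ih]
    · have hlt : a < n := lt_of_not_ge hcmp
      simp only [pvAWitnessLoop, if_neg hcmp, List.all_cons, ih, hlt]
      by_cases h1 : pvPowMod a n d.toNat = 1 ∨ pvPowMod a n d.toNat = n - 1
      · simp [h1]
      · by_cases h2 : pvAInner n (pvPowMod a n d.toNat) (rr - 1).toNat = true <;>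
          simp [h1]

-- the two primality tests agree on every integer
theorem pvIsPrime_eq (n : Int) : pvIsPrimeA n = pvIsPrimeB n := by
  have hmod2 : PySem.Int.mod n 2 = n % 2 := PySem.Int.mod_eq_emod_of_pos (by norm_num)
  have hmod3 : PySem.Int.mod n 3 = n % 3 := PySem.Int.mod_eq_emod_of_pos (by norm_num)
  by_cases hlt : n < 9
  · -- small n: both sides reduce to the finite table
    simp only [pvIsPrimeA, pvIsPrimeB, if_pos hlt, hmod2, hmod3]
    by_cases h2 : n < 2
    · rw [if_pos h2]
      have : ¬ (n = 2 ∨ n = 3 ∨ n = 5 ∨ n = 7) := by omega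
      simp [this]
    · rw [if_neg h2]
      interval_cases n <;> decide
  · -- n ≥ 9
    have h2 : ¬ n < 2 := by omega
    have hne2 : n ≠ 2 := by omega
    simp only [pvIsPrimeA, pvIsPrimeB, if_neg hlt, if_neg h2, if_neg hne2, hmod2, hmod3]
    by_cases he : n % 2 = 0
    · simp [he]
    · rw [if_neg he]
      by_cases h3 : n % 3 = 0
      · simp [he, h3]
      · rw [if_neg h3, if_neg (by omega : ¬ (n % 2 = 0 ∨ n % 3 = 0))]
        -- Miller-Rabin tails; n ≥ 11, n odd, 3 ∤ n
        have hn0 : (0:Int) < n := by omega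
        have hn11 : 11 ≤ n := by omega
        have hd1 : (0:Int) < n - 1 := by omega
        have hle : n - 1 ≤ (((n - 1).toNat : Nat) : Int) := by omega
        obtain ⟨s, m, heq, hodd, hmpos, hfac⟩ :=
          pvMRDecomp_spec (n - 1).toNat 0 (n - 1) hd1 hle
        have hs1 : 1 ≤ s := by
          rcases Nat.eq_zero_or_pos s with h | h
          · exfalso
            rw [h, pow_zero, mul_one] at hfac
            have : PySem.Int.mod (n - 1) 2 = 1 := hfac ▸ hodd
            rw [PySem.Int.mod_eq_emod_of_pos (by norm_num)] at this
            omega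
          · exact h
        have hsle : s ≤ (n - 1).toNat := by
          have h2s : (2:Int) ^ s ≤ n - 1 := by
            calc (2:Int) ^ s = 1 * 2 ^ s := by ring
            _ ≤ m * 2 ^ s := by
              apply mul_le_mul_of_nonneg_right (by omega) (by positivity)
            _ = n - 1 := hfac.symm
          have hlt2 : (s : Int) < 2 ^ s := by
            exact_mod_cast Nat.lt_two_pow_self
          omega
        have hrr1 : ((0:Int) + (s : Int) - 1).toNat = s - 1 := by omega
        unfold pvMRA
        rw [heq]
        simp only
        rw [pvAWitnessLoop_eq_all, List.all_filter]
        have hws : pvWitnessesA = pvBasesB := rfl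
        rw [hws]
        congr 1
        funext a
        congr 1
        rw [Bool.eq_iff_iff]
        have hxa : pvPowMod a n m.toNat = a ^ m.toNat % n := pvPowMod_correct a n hn0 m.toNat
        have hchain : ∀ i : Nat, (a ^ m.toNat) ^ (2 ^ i) = a ^ (m.toNat * 2 ^ i) := by
          intro i; rw [← pow_mul]
        have hBrw : pvStrong n a (n - 1).toNat (n - 1)
            = pvStrong n a (n - 1).toNat (m * 2 ^ s) :=
          congrArg (pvStrong n a (n - 1).toNat) hfac
        constructor
        · intro h
          rw [Bool.or_eq_true, decide_eq_true_eq] at h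
          rw [hBrw, pvStrong_spec n a hn0 s (n - 1).toNat m hmpos hodd hsle]
          rcases h with h | h
          · rcases h with h | h
            · right; rw [← hxa]; exact h
            · left
              exact ⟨0, by omega, by rw [pow_zero, mul_one, ← hxa]; exact h⟩
          · rw [hrr1, hxa] at h
            rw [pvAInner_spec n hn0 (s - 1) (a ^ m.toNat)] at h
            obtain ⟨i, hi1, hi2, hi3⟩ := h
            rw [hchain] at hi3
            exact Or.inl ⟨i, by omega, hi3⟩
        · intro h
          rw [hBrw, pvStrong_spec n a hn0 s (n - 1).toNat m hmpos hodd hsle] at h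
          rw [Bool.or_eq_true, decide_eq_true_eq]
          rcases h with ⟨i, hi, hhit⟩ | h
          · rcases Nat.eq_zero_or_pos i with hi0 | hi0
            · subst hi0
              rw [pow_zero, mul_one] at hhit
              left; right; rw [hxa]; exact hhit
            · right
              rw [hrr1, hxa, pvAInner_spec n hn0 (s - 1) (a ^ m.toNat)]
              exact ⟨i, by omega, by omega, by rw [hchain]; exact hhit⟩
          · left; left; rw [hxa]; exact h

-- _next_prime's result does not depend on the fuel, as long as the fuel covers the scan (M ≥ 1)
theorem pvNextPrime_fuel (M limit : Int) (hM : 0 < M) : ∀ (f1 f2 : Nat) (p : Int),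
    (limit - p).toNat < f1 → (limit - p).toNat < f2 →
    pvNextPrime M limit f1 p = pvNextPrime M limit f2 p := by
  intro f1
  induction f1 with
  | zero => intro f2 p h1 _; omega
  | succ f ih =>
    intro f2 p h1 h2
    obtain ⟨g, rfl⟩ : ∃ g, f2 = g + 1 := ⟨f2 - 1, by omega⟩
    by_cases hp : p < limit
    · simp only [pvNextPrime, if_pos hp]
      by_cases hpr : 1 < p ∧ pvIsPrimeB p = true
      · rw [if_pos hpr, if_pos hpr]
      · rw [if_neg hpr, if_neg hpr]
        exact ih g (p + M) (by omega) (by omega)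
    · simp only [pvNextPrime, if_neg hp]

-- skipping a non-prime step leaves _next_prime's answer unchanged (M ≥ 1)
theorem pvNextPrime_skip (M limit : Int) (hM : 0 < M) (p : Int) (hp : p < limit)
    (hnp : ¬ (1 < p ∧ pvIsPrimeB p = true)) :
    pvNextPrime M limit ((limit - p).toNat + 1) p
      = pvNextPrime M limit ((limit - (p + M)).toNat + 1) (p + M) := by
  rw [show pvNextPrime M limit ((limit - p).toNat + 1) p
      = pvNextPrime M limit ((limit - p).toNat) (p + M) by
    simp only [pvNextPrime, if_pos hp, if_neg hnp]]
  exact pvNextPrime_fuel M limit hM _ _ (p + M) (by omega) (by omega)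

-- A's fused while-loop equals B's nested next-prime loop, for M ≥ 1
theorem pvLoop_eq (M count limit : Int) (hM : 0 < M) : ∀ (fuel : Nat) (p : Int) (acc : List Int),
    (limit - p).toNat < fuel →
    pvALoop M count limit fuel p acc = pvBOuter M limit (count - acc.length).toNat p acc := by
  intro fuel
  induction fuel with
  | zero => intro p acc h; omega
  | succ f ih =>
    intro p acc hfu
    by_cases hc : count ≤ (acc.length : Int)
    · have hk : (count - acc.length).toNat = 0 := by omega
      rw [hk]
      simp only [pvALoop, pvBOuter]
      rw [if_neg (by omega : ¬ ((acc.length : Int) < count ∧ p < limit))]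
    · have hk : (count - acc.length).toNat = (count - acc.length - 1).toNat + 1 := by omega
      rw [hk]
      by_cases hp : p < limit
      · by_cases hpr : 1 < p ∧ pvIsPrimeA p = true
        · have hprB : 1 < p ∧ pvIsPrimeB p = true := by
            rw [← pvIsPrime_eq]; exact hpr
          have hA : pvALoop M count limit (f + 1) p acc
              = pvALoop M count limit f (p + M) (acc ++ [p]) := by
            simp only [pvALoop]
            rw [if_pos ⟨by omega, hp⟩, if_pos hpr]
          have hnp : pvNextPrime M limit ((limit - p).toNat + 1) p = some p := by
            simp only [pvNextPrime, if_pos hp, if_pos hprB]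
          rw [hA]
          show _ = pvBOuter M limit ((count - acc.length - 1).toNat + 1) p acc
          rw [show pvBOuter M limit ((count - acc.length - 1).toNat + 1) p acc
              = pvBOuter M limit ((count - acc.length - 1).toNat) (p + M) (acc ++ [p]) by
            simp only [pvBOuter, hnp]]
          have := ih (p + M) (acc ++ [p]) (by omega)
          rw [this]
          congr 1
          simp only [List.length_append, List.length_cons, List.length_nil]
          omega
        · have hprB : ¬ (1 < p ∧ pvIsPrimeB p = true) := by
            rw [← pvIsPrime_eq]; exact hpr
          have hA : pvALoop M count limit (f + 1) p acc
              = pvALoop M count limit f (p + M) acc := by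
            simp only [pvALoop]
            rw [if_pos ⟨by omega, hp⟩, if_neg hpr]
          have hB : pvBOuter M limit ((count - acc.length - 1).toNat + 1) p acc
              = pvBOuter M limit ((count - acc.length - 1).toNat + 1) (p + M) acc := by
            simp only [pvBOuter]
            rw [pvNextPrime_skip M limit hM p hp hprB]
          rw [hA, hB, ih (p + M) acc (by omega), ← hk]
      · simp only [pvALoop, pvBOuter]
        rw [if_neg (by tauto : ¬ ((acc.length : Int) < count ∧ p < limit))]
        have : pvNextPrime M limit ((limit - p).toNat + 1) p = none := by
          simp only [pvNextPrime, if_neg hp]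
        rw [this]

-- ===== VERDICT (by name: the statement is the Claim_ definition above) =====
theorem get_primes_in_class_spec : Claim_equal_get_primes_in_class := by
  intro r M count limit _hDom hPre
  unfold Spec_get_primes_in_class get_primes_in_class get_primes_in_class_alt
  rcases hPre with hM | hPre
  · rw [pvLoop_eq M count limit hM ((limit - r).toNat + 1) r [] (by omega)]
    congr 1
    simp
  · by_cases hcnt : count ≤ 0
    · have hA : pvALoop M count limit ((limit - r).toNat + 1) r [] = [] := by
        simp only [pvALoop]
        rw [if_neg (by rintro ⟨h1, -⟩; simp at h1; omega)]
      have hk : count.toNat = 0 := by omega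
      rw [hA, hk]
      rfl
    · have hlr : limit ≤ r := by tauto
      have hA : pvALoop M count limit ((limit - r).toNat + 1) r [] = [] := by
        simp only [pvALoop]
        rw [if_neg (by rintro ⟨-, h2⟩; omega)]
      have hnp : pvNextPrime M limit ((limit - r).toNat + 1) r = none := by
        simp only [pvNextPrime]
        rw [if_neg (by omega : ¬ r < limit)]
      have hB : pvBOuter M limit count.toNat r [] = [] := by
        cases h : count.toNat with
        | zero => rfl
        | succ k => simp only [pvBOuter, hnp]
      rw [hA, hB]
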